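-- pv_equiv track=rewrite | github.com/riccardoluongo/saving | db.py | get_wallet_name
-- ===== SOURCE A (Python) =====
-- def get_wallet_name(input_string):
--     result = ""
--     index = 0
--     word = 'balance'
--
--     word_length = len(word)
--
--     while index < len(input_string):
--         if input_string[index:index + word_length] == word:
--             if index > 0:
--                 result = result[:-1]
--             index += word_length
--         else:
--             result += input_string[index]
--             index += 1
--
--     return result
-- ===== SOURCE B (Python) =====
-- def get_wallet_name(input_string):
--     result = ""
--     index = 0
--     while True:
--         pos = input_string.find('balance', index)
--         if pos == -1:
--             result += input_string[index:]
--             return result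
--         result += input_string[index:pos]
--         if pos > 0:
--             result = result[:-1]
--         index = pos + 7
-- ===== Notes on version B (the rewrite author's own statement) =====
-- stated objective: faster
-- what changed: Replaces the per-character scan (slice-compare 'balance' at every index, append one char at a time) with a segment-and-jump loop driven by str.find: copy the whole slice up to the next occurrence, drop the preceding char, jump past the match.
import Mathlib
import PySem

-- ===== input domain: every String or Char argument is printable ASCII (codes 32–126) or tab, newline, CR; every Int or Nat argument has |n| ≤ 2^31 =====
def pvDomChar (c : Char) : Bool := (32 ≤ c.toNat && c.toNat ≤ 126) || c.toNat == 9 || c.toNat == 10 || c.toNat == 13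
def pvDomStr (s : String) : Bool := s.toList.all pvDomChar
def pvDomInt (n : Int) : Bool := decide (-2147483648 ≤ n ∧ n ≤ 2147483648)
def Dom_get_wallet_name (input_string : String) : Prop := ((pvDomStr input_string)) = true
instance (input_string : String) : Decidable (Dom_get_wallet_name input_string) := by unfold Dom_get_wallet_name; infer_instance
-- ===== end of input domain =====

-- B replaces A's per-character scan with a find-driven segment-and-jump loop (alternative decomposition, same results).

-- ===== PORT A =====
-- word = 'balance'
def pvWord : List Char := "balance".toList

-- A's while loop over `index`; result[:-1] is List.dropLast (exact: Python's [:-1]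
-- drops the last element and is a no-op on the empty string); input_string[index]
-- is in range since index < len under the loop guard.
def pvLoopA (s : List Char) (index : Nat) (result : List Char) : List Char :=
  if h : index < s.length then
    if PySem.List.slice s (some (index : Int)) (some ((index : Int) + (pvWord.length : Int))) = pvWord then
      pvLoopA s (index + pvWord.length)
        (if index > 0 then result.dropLast else result)
    else
      pvLoopA s (index + 1) (result ++ [s[index]])
  else result
termination_by s.length - index
decreasing_by all_goals simp [pvWord] at *; omega

def get_wallet_name (input_string : String) : String :=
  String.ofList (pvLoopA input_string.toList 0 [])

-- ===== PORT B =====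
-- B's `while True` loop: pos = input_string.find('balance', index); the dite guard
-- (0 ≤ pos ∧ index ≤ pos ∧ pos ≤ len) is Python's `pos != -1` plus the bounds
-- str.find always satisfies when it succeeds, carried only for termination;
-- input_string[index:pos] and input_string[index:] are PySem.List.slice;
-- result[:-1] is List.dropLast (exact, no-op on empty).
def pvLoopB (s : List Char) (index : Nat) (result : List Char) : List Char :=
  let pos := PySem.Chars.findFrom s pvWord (index : Int)
  if h : 0 ≤ pos ∧ (index : Int) ≤ pos ∧ pos ≤ (s.length : Int) then
    let r1 := result ++ PySem.List.slice s (some (index : Int)) (some pos)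
    pvLoopB s (pos.toNat + 7) (if pos > 0 then r1.dropLast else r1)
  else
    result ++ PySem.List.slice s (some (index : Int))
termination_by s.length + 7 - index
decreasing_by omega

def get_wallet_name_alt (input_string : String) : String :=
  String.ofList (pvLoopB input_string.toList 0 [])

-- ===== PRECONDITION & SPEC =====
def Spec_get_wallet_name (input_string : String) (out : String) : Prop := out = get_wallet_name_alt input_string
instance (input_string : String) (out : String) : Decidable (Spec_get_wallet_name input_string out) := by unfold Spec_get_wallet_name; infer_instance

-- ===== CLAIM (what is proved, stated in full; the proofs are below) =====
def Claim_equal_get_wallet_name : Prop := ∀ (input_string : String), Dom_get_wallet_name input_string → Spec_get_wallet_name input_string (get_wallet_name input_string)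

-- ===== LEMMAS AND PROOFS =====

theorem pvWord_ne_nil : pvWord ≠ [] := by decide
theorem pvWord_len : pvWord.length = 7 := by decide

theorem pvLoopA_no_occ (s : List Char) (index : Nat) (result : List Char)
    (hno : ¬ pvWord <:+: s.drop index) :
    pvLoopA s index result = result ++ s.drop index := by
  revert hno
  fun_induction pvLoopA s index result with
  | case1 index result h ht ih =>
    intro hno
    exfalso
    apply hno
    have : PySem.List.slice s (some (index : Int)) (some ((index : Int) + (pvWord.length : Int))) = (s.drop index).take pvWord.length := by
      have := PySem.List.slice_natCast s index (index + pvWord.length)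
      push_cast at this ⊢
      rw [this]
      congr 1
      omega
    rw [this] at ht
    exact (ht ▸ List.take_prefix _ _).isInfix
  | case2 index result h ht ih =>
    intro hno
    rw [ih]
    · rw [List.drop_eq_getElem_cons h]
      simp
    · intro hin
      exact hno (hin.trans ((List.drop_drop (i := 1) (j := index) (l := s)) ▸ (List.drop_suffix 1 (s.drop index)).isInfix))
  | case3 index result h =>
    intro _
    rw [List.drop_eq_nil_of_le (by omega)]
    simp

theorem pvLoopA_to_occ (s : List Char) (index p : Nat) (result : List Char)
    (hip : index ≤ p)
    (hocc : pvWord <+: s.drop p)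
    (hmin : ∀ j, index ≤ j → j < p → ¬ pvWord <+: s.drop j) :
    pvLoopA s index result =
      pvLoopA s (p + 7)
        (if p > 0 then (result ++ (s.take p).drop index).dropLast
         else result ++ (s.take p).drop index) := by
  have hplen : p < s.length := by
    by_contra hc
    rw [List.drop_eq_nil_of_le (by omega)] at hocc
    exact pvWord_ne_nil (List.prefix_nil.mp hocc)
  -- slice at j equals take 7 (drop j s)
  have hslice : ∀ j : Nat, PySem.List.slice s (some (j : Int)) (some ((j : Int) + (pvWord.length : Int))) = (s.drop j).take pvWord.length := by
    intro j
    have := PySem.List.slice_natCast s j (j + pvWord.length)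
    push_cast at this ⊢
    rw [this]; congr 1; omega
  revert hip hmin
  fun_induction pvLoopA s index result with
  | case1 index result h ht ih =>
    intro hip hmin
    -- match fires: must be index = p
    have hpre : pvWord <+: s.drop index := by
      rw [hslice index] at ht
      exact ht ▸ List.take_prefix _ _
    have hieq : index = p := by
      by_contra hne
      exact hmin index le_rfl (by omega) hpre
    subst hieq
    have hseg : (s.take index).drop index = [] := by simp
    rw [hseg]
    simp [pvWord_len]
  | case2 index result h ht ih =>
    intro hip hmin
    have hne : index ≠ p := by
      intro he; subst he
      apply ht
      rw [hslice index]
      obtain ⟨t, htl⟩ := hocc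
      rw [← htl, List.take_append_of_le_length le_rfl, List.take_length]
    rw [ih (by omega) (fun j hj hjp => hmin j (by omega) hjp)]
    have hseg : (s.take p).drop index = s[index] :: (s.take p).drop (index + 1) := by
      rw [List.drop_eq_getElem_cons (by simp; omega)]
      simp [List.getElem_take]
    rw [hseg]
    simp
  | case3 index result h =>
    intro hip hmin
    omega

theorem pvLoop_eq (s : List Char) (index : Nat) (result : List Char) :
    pvLoopA s index result = pvLoopB s index result := by
  have main : ∀ (n index : Nat) (result : List Char), s.length + 7 - index ≤ n →
      pvLoopA s index result = pvLoopB s index result := by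
    intro n
    induction n with
    | zero =>
      intro index result hn
      -- index ≥ s.length + 7
      rw [pvLoopB]
      simp only
      rw [dif_neg (by omega)]
      rw [pvLoopA, dif_neg (by omega)]
      rw [PySem.List.slice_from s (by positivity), List.drop_eq_nil_of_le (by omega)]
      simp
    | succ n ih =>
      intro index result hn
      by_cases hk : index ≤ s.length
      · rw [pvLoopB]
        simp only
        rw [PySem.Chars.findFrom_natCast s pvWord index hk]
        set f := PySem.Chars.find (s.drop index) pvWord with hf
        by_cases hfneg : f = -1
        · rw [if_pos hfneg, dif_neg (by norm_num)]
          rw [pvLoopA_no_occ s index result (by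
            rw [hf] at hfneg
            exact (PySem.Chars.find_eq_neg_one_iff _ _).mp hfneg)]
          rw [PySem.List.slice_from s (by positivity)]
          simp
        · have hf0 : 0 ≤ f := by
            have := PySem.Chars.neg_one_le_find (s.drop index) pvWord
            rw [← hf] at this; omega
          have hflen : f ≤ (s.length : Int) - index := by
            have := PySem.Chars.find_le_length (s.drop index) pvWord
            rw [← hf] at this; simp at this; omega
          rw [if_neg hfneg, dif_pos (by constructor <;> [omega; constructor <;> omega])]
          have hspec := PySem.Chars.find_spec (s := s.drop index) (sub := pvWord) (by rw [← hf]; exact hf0)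
          rw [← hf] at hspec
          set p : Nat := index + f.toNat with hp
          have hcast : (index : Int) + f = (p : Int) := by omega
          have htn : ((index : Int) + f).toNat = p := by omega
          have hseg : PySem.List.slice s (some (index : Int)) (some ((index : Int) + f)) = (s.take p).drop index := by
            rw [hcast, PySem.List.slice_natCast s index p, List.drop_take]
          have hocc : pvWord <+: s.drop p := by
            have := hspec.1
            rwa [List.drop_drop, hf, ← hp] at this
          have hmin : ∀ j, index ≤ j → j < p → ¬ pvWord <+: s.drop j := by
            intro j hj1 hj2 hpre
            apply hspec.2 (j - index) (by omega)
            rwa [List.drop_drop, Nat.add_sub_cancel' hj1]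
          rw [pvLoopA_to_occ s index p result (by omega) hocc hmin]
          rw [htn, hseg]
          have hposif : (if (index : Int) + f > 0 then (result ++ (s.take p).drop index).dropLast else result ++ (s.take p).drop index) = (if p > 0 then (result ++ (s.take p).drop index).dropLast else result ++ (s.take p).drop index) := by
            by_cases hpz : p > 0
            · rw [if_pos (by omega), if_pos hpz]
            · rw [if_neg (by omega), if_neg hpz]
          rw [hposif]
          exact ih (p + 7) _ (by omega)
      · rw [pvLoopB]
        simp only
        rw [dif_neg (by omega)]
        rw [pvLoopA, dif_neg (by omega)]
        rw [PySem.List.slice_from s (by positivity), List.drop_eq_nil_of_le (by omega)]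
        simp
  exact main (s.length + 7 - index) index result le_rfl

-- ===== VERDICT (by name: the statement is the Claim_ definition above) =====
theorem get_wallet_name_spec : Claim_equal_get_wallet_name := by
  intro s _
  unfold Spec_get_wallet_name get_wallet_name get_wallet_name_alt
  rw [pvLoop_eq]
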